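-- pv_equiv track=rewrite | github.com/ovsrobot/dpdk | devtools/analyze-patch.py | get_last_subject
-- ===== SOURCE A (Python) =====
-- def get_last_subject(patch_content):
--     """Extract subject from the last patch in an mbox."""
--     # Find all Subject lines with potential continuations
--     subjects = []
--     lines = patch_content.split("\n")
--     i = 0
--     while i < len(lines):
--         if lines[i].lower().startswith("subject:"):
--             subject = lines[i][8:].strip()
--             i += 1
--             # Handle continuation lines
--             while i < len(lines) and lines[i].startswith((" ", "\t")):
--                 subject += lines[i].strip()
--                 i += 1
--             subjects.append(subject)
--         else:
--             i += 1
--     return subjects[-1] if subjects else None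
-- ===== SOURCE B (Python) =====
-- def get_last_subject(patch_content):
--     """Extract subject from the last patch in an mbox."""
--     lines = patch_content.split("\n")
--     for i in range(len(lines) - 1, -1, -1):
--         if lines[i].lower().startswith("subject:"):
--             subject = lines[i][8:].strip()
--             for line in lines[i + 1:]:
--                 if not line.startswith((" ", "\t")):
--                     break
--                 subject += line.strip()
--             return subject
--     return None
-- ===== Notes on version B (the rewrite author's own statement) =====
-- stated objective: alternative
-- what changed: Instead of collecting every subject (with continuations) in a forward while-loop and taking the last, B scans the lines backward for the last 'subject:' header and reconstructs only that one subject with a short forward walk over its continuation lines.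
import Mathlib
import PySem

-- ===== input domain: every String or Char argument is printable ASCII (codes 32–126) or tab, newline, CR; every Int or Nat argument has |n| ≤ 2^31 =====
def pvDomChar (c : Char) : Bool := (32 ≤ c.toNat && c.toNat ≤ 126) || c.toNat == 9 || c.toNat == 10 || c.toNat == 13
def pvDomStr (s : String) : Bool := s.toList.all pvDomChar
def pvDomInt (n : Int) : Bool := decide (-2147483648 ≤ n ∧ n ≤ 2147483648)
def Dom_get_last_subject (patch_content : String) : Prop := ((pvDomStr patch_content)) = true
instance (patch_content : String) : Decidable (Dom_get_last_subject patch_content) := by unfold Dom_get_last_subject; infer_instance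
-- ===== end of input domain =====

-- B locates the last "subject:" header by a backward scan and rebuilds only that subject,
-- instead of A's forward collection of every subject; return values proved equal on all inputs.


-- shared tiny predicates (used verbatim by both Pythons)
-- lines[i].lower().startswith("subject:")
def isSubj (l : List Char) : Bool := PySem.Chars.startswith (PySem.Chars.lower l) "subject:".toList
-- line.startswith((" ", "\t"))
def isCont (l : List Char) : Bool := PySem.Chars.startswith l [' '] || PySem.Chars.startswith l ['\t']
-- lines[i][8:].strip()
def subj8 (l : List Char) : List Char := PySem.Chars.strip (PySem.Chars.slice l (some 8) none)

-- ===== PORT A =====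
-- A's inner continuation while-loop: consumes continuation lines, returns (subject, remaining lines)
def contA (subject : List Char) : List (List Char) → List Char × List (List Char)
  | [] => (subject, [])
  | l :: rest =>
    if isCont l then contA (subject ++ PySem.Chars.strip l) rest
    else (subject, l :: rest)

theorem contA_len (subject : List Char) (ls : List (List Char)) :
    (contA subject ls).2.length ≤ ls.length := by
  induction ls generalizing subject with
  | nil => simp [contA]
  | cons l rest ih =>
    simp only [contA]
    split
    · exact Nat.le_succ_of_le (ih _)
    · simp

-- A's outer while-loop over the lines, accumulating the subjects list
def loopA (subjects : List (List Char)) : List (List Char) → List (List Char)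
  | [] => subjects
  | l :: rest =>
    if isSubj l then
      let p := contA (subj8 l) rest
      loopA (subjects ++ [p.1]) p.2
    else loopA subjects rest
termination_by ls => ls.length
decreasing_by
  · exact Nat.lt_succ_of_le (contA_len _ _)
  · simp

def get_last_subject (patch_content : String) : Option String :=
  -- subjects[-1] if subjects else None
  match (loopA [] (PySem.Chars.splitOn patch_content.toList ['\n'])).getLast? with
  | none => none
  | some s => some (String.ofList s)

-- ===== PORT B =====
-- B's inner continuation for-loop (breaks at the first non-continuation line)
def contB (subject : List Char) : List (List Char) → List Char
  | [] => subject
  | l :: rest =>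
    if isCont l then contB (subject ++ PySem.Chars.strip l) rest
    else subject

-- B's backward scan: first argument is the not-yet-visited lines in reverse order,
-- second argument the lines already passed (= lines[i+1:] in forward order)
def scanB : List (List Char) → List (List Char) → Option (List Char)
  | [], _ => none
  | l :: before, after =>
    if isSubj l then some (contB (subj8 l) after)
    else scanB before (l :: after)

def get_last_subject_alt (patch_content : String) : Option String :=
  match scanB (PySem.Chars.splitOn patch_content.toList ['\n']).reverse [] with
  | none => none
  | some s => some (String.ofList s)

-- ===== PRECONDITION & SPEC =====
def Spec_get_last_subject (patch_content : String) (out : Option String) : Prop := out = get_last_subject_alt patch_content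
instance (patch_content : String) (out : Option String) : Decidable (Spec_get_last_subject patch_content out) := by unfold Spec_get_last_subject; infer_instance

-- ===== CLAIM (what is proved, stated in full; the proofs are below) =====
def Claim_equal_get_last_subject : Prop := ∀ (patch_content : String), Dom_get_last_subject patch_content → Spec_get_last_subject patch_content (get_last_subject patch_content)

-- ===== LEMMAS AND PROOFS =====

-- forward characterisation of B's backward scan: the LAST subject wins
def lastSub : List (List Char) → List (List Char) → Option (List Char)
  | [], _ => none
  | l :: rest, after =>
    match lastSub rest after with
    | some x => some x
    | none => if isSubj l then some (contB (subj8 l) (rest ++ after)) else none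

theorem lastSub_snoc (ys : List (List Char)) (l : List Char) (after : List (List Char)) :
    lastSub (ys ++ [l]) after =
      if isSubj l then some (contB (subj8 l) after) else lastSub ys (l :: after) := by
  induction ys generalizing after with
  | nil => simp [lastSub]
  | cons y ys ih =>
    simp only [List.cons_append, lastSub, ih]
    by_cases h : isSubj l
    · simp [h]
    · simp [h]

theorem scanB_eq (ls after : List (List Char)) :
    scanB ls.reverse after = lastSub ls after := by
  induction ls using List.reverseRecOn generalizing after with
  | nil => simp [scanB, lastSub]
  | append_singleton ys l ih =>
    rw [lastSub_snoc]
    simp only [List.reverse_append, List.reverse_singleton, List.singleton_append, scanB]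
    by_cases h : isSubj l
    · simp [h]
    · simp [h, ih]

-- a continuation line is never a subject line
theorem isCont_not_isSubj (l : List Char) (h : isCont l = true) : isSubj l = false := by
  rcases Bool.or_eq_true_iff.mp h with h' | h' <;>
  · obtain ⟨t, rfl⟩ := (PySem.Chars.startswith_iff _ _).mp h'
    simp only [List.singleton_append, isSubj]
    refine Bool.eq_false_iff.mpr fun hc => ?_
    obtain ⟨u, hu⟩ := (PySem.Chars.startswith_iff _ _).mp hc
    simp [PySem.Chars.lower] at hu
    exact absurd hu.1 (by decide)

theorem lastSub_skip (pre zs : List (List Char)) (h : ∀ c ∈ pre, isCont c = true) :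
    lastSub (pre ++ zs) [] = lastSub zs [] := by
  induction pre with
  | nil => simp
  | cons c pre ih =>
    have hc := isCont_not_isSubj c (h c (by simp))
    simp only [List.cons_append, lastSub, ih (fun x hx => h x (by simp [hx])), hc]
    cases lastSub zs [] <;> simp

theorem contA_fst (subject : List Char) (ls : List (List Char)) :
    (contA subject ls).1 = contB subject ls := by
  induction ls generalizing subject with
  | nil => rfl
  | cons l rest ih =>
    simp only [contA, contB]
    split <;> simp [ih]

theorem contA_decomp (subject : List Char) (ls : List (List Char)) :
    ∃ pre, ls = pre ++ (contA subject ls).2 ∧ ∀ c ∈ pre, isCont c = true := by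
  induction ls generalizing subject with
  | nil => exact ⟨[], by simp [contA]⟩
  | cons l rest ih =>
    by_cases h : isCont l
    · obtain ⟨pre, hpre, hall⟩ := ih (subject ++ PySem.Chars.strip l)
      exact ⟨l :: pre, by simpa [contA, h] using hpre,
        fun c hc => by
          rcases List.mem_cons.mp hc with rfl | hc
          · exact h
          · exact hall c hc⟩
    · exact ⟨[], by simp [contA, h]⟩

theorem loopA_acc (n : Nat) : ∀ ls : List (List Char), ls.length ≤ n →
    ∀ acc, loopA acc ls = acc ++ loopA [] ls := by
  induction n with
  | zero =>
    intro ls hls acc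
    rw [List.length_eq_zero_iff.mp (Nat.le_zero.mp hls)]
    simp [loopA]
  | succ n ih =>
    intro ls hls acc
    match ls with
    | [] => simp [loopA]
    | l :: rest =>
      simp only [loopA]
      by_cases h : isSubj l
      · simp only [h, if_true]
        have hlen : (contA (subj8 l) rest).2.length ≤ n :=
          le_trans (contA_len _ _) (by simpa using hls)
        rw [ih _ hlen (acc ++ [(contA (subj8 l) rest).1]), ih _ hlen ([] ++ [(contA (subj8 l) rest).1])]
        simp
      · rw [if_neg h, if_neg h]
        exact ih _ (by simpa using hls) acc

theorem gA_eq (n : Nat) : ∀ ls : List (List Char), ls.length ≤ n →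
    (loopA [] ls).getLast? = lastSub ls [] := by
  induction n with
  | zero =>
    intro ls hls
    rw [List.length_eq_zero_iff.mp (Nat.le_zero.mp hls)]
    simp [loopA, lastSub]
  | succ n ih =>
    intro ls hls
    match ls with
    | [] => simp [loopA, lastSub]
    | l :: rest =>
      have hrest : rest.length ≤ n := by simpa using hls
      simp only [loopA, lastSub]
      by_cases h : isSubj l
      · simp only [h, if_true]
        have hlen : (contA (subj8 l) rest).2.length ≤ n := le_trans (contA_len _ _) hrest
        rw [loopA_acc _ _ hlen, List.nil_append, List.singleton_append, List.getLast?_cons]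
        obtain ⟨pre, hpre, hall⟩ := contA_decomp (subj8 l) rest
        have hskip : lastSub rest [] = lastSub (contA (subj8 l) rest).2 [] := by
          conv_lhs => rw [hpre]
          exact lastSub_skip pre _ hall
        rw [hskip, ← ih _ hlen]
        cases hg : (loopA [] (contA (subj8 l) rest).2).getLast? with
        | none => simp [contA_fst]
        | some x => simp
      · rw [if_neg h, if_neg h, ih _ hrest]
        cases lastSub rest [] <;> simp

-- ===== VERDICT (by name: the statement is the Claim_ definition above) =====
theorem get_last_subject_spec : Claim_equal_get_last_subject := by
  intro patch_content _
  unfold Spec_get_last_subject get_last_subject get_last_subject_alt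
  rw [scanB_eq, gA_eq (PySem.Chars.splitOn patch_content.toList ['\n']).length _ le_rfl]
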